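-- pv_equiv track=rewrite | github.com/cmbi/kmad-web | kmad_web/domain/mutation.py | _get_alignment_position
-- ===== SOURCE A (Python) =====
-- def _get_alignment_position(sequence, position):
--     aligned = sequence['aligned']
--     count = -1
--     i = -1
--     while i < len(aligned) - 1 and count < position:
--         i += 1
--         if aligned[i] != '-':
--             count += 1
--     return i
-- ===== SOURCE B (Python) =====
-- def _get_alignment_position(sequence, position):
--     aligned = sequence['aligned']
--     positions = [i for i, ch in enumerate(aligned) if ch != '-']
--     if 0 <= position < len(positions):
--         return positions[position]
--     return -1 if position < 0 else len(aligned) - 1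
-- ===== Notes on version B (the rewrite author's own statement) =====
-- stated objective: simpler
-- what changed: Replaces the interleaved scan-count-stop while loop with a precomputed table of non-gap indices plus a single bounds-checked lookup (clamping to len-1 on overflow and -1 for negative positions).
import Mathlib
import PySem

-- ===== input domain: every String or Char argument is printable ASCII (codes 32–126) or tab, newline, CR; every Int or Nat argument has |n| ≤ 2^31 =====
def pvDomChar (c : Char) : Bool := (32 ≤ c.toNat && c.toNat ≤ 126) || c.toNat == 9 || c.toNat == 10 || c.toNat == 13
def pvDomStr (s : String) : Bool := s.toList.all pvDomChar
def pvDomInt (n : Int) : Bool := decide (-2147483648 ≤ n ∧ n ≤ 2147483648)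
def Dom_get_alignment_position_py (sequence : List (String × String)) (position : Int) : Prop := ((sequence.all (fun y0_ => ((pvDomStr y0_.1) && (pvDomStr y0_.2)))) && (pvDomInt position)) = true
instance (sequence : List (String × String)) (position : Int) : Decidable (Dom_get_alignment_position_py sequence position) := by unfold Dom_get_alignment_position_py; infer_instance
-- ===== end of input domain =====

-- B replaces A's counting while-loop with a precomputed table of non-gap indices
-- plus one bounds-checked lookup (objective: simpler; same return value everywhere A returns).

-- ===== PORT A =====
-- the while loop of A: rest = characters at indices i+1.., so 'i < len(aligned)-1' ↔ rest ≠ []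
def pvLoopA : List Char → Int → Int → Int → Int
  | [], i, _, _ => i
  | c :: rs, i, count, position =>
    if count < position then
      pvLoopA rs (i + 1) (if c ≠ '-' then count + 1 else count) position
    else i

def get_alignment_position_py (sequence : List (String × String)) (position : Int) : Int :=
  let aligned := (sequence.lookup "aligned").getD ""   -- Pre_ guarantees the key is present
  pvLoopA aligned.toList (-1) (-1) position

-- ===== PORT B =====
def get_alignment_position_py_alt (sequence : List (String × String)) (position : Int) : Int :=
  let aligned := (sequence.lookup "aligned").getD ""   -- Pre_ guarantees the key is present
  let cs := aligned.toList
  let positions : List Int :=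
    (PySem.List.enumerate cs).filterMap (fun p => if p.2 ≠ '-' then some p.1 else none)
  if 0 ≤ position ∧ position < (positions.length : Int) then
    PySem.List.pyGetD positions position 0
  else if position < 0 then -1 else (cs.length : Int) - 1

-- ===== PRECONDITION & SPEC =====
-- Pre_ excludes only sequences without an "aligned" key, on which A raises KeyError.
def Pre_get_alignment_position_py (sequence : List (String × String)) (position : Int) : Prop :=
  (sequence.lookup "aligned").isSome = true
instance (sequence : List (String × String)) (position : Int) : Decidable (Pre_get_alignment_position_py sequence position) := by unfold Pre_get_alignment_position_py; infer_instance
def pvWitness_get_alignment_position_py : (List (String × String)) × Int := ([("aligned", "A-B")], 1)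

def Spec_get_alignment_position_py (sequence : List (String × String)) (position : Int) (out : Int) : Prop := out = get_alignment_position_py_alt sequence position
instance (sequence : List (String × String)) (position : Int) (out : Int) : Decidable (Spec_get_alignment_position_py sequence position out) := by unfold Spec_get_alignment_position_py; infer_instance

-- ===== CLAIM (what is proved, stated in full; the proofs are below) =====
def Claim_equal_get_alignment_position_py : Prop := ∀ (sequence : List (String × String)) (position : Int), Dom_get_alignment_position_py sequence position → Pre_get_alignment_position_py sequence position → Spec_get_alignment_position_py sequence position (get_alignment_position_py sequence position)

-- ===== LEMMAS AND PROOFS =====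

-- the non-gap index table with indices counted from 0, as a structural recursion
def pvNpos : List Char → List Int
  | [] => []
  | c :: rs => if c ≠ '-' then 0 :: (pvNpos rs).map (· + 1) else (pvNpos rs).map (· + 1)

lemma pvEnumerate_filterMap (cs : List Char) (s : Int) :
    (PySem.List.enumerate cs s).filterMap (fun p => if p.2 ≠ '-' then some p.1 else none)
      = (pvNpos cs).map (· + s) := by
  induction cs generalizing s with
  | nil => simp [PySem.List.enumerate_nil, pvNpos]
  | cons c rs ih =>
    simp only [PySem.List.enumerate_cons, List.filterMap_cons, pvNpos, ih]
    by_cases hc : c = '-' <;> simp [hc, List.map_map, Function.comp_def] <;>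
      · intro a _; ring

lemma pvLoopA_stop (cs : List Char) (i count position : Int) (h : ¬ count < position) :
    pvLoopA cs i count position = i := by
  cases cs <;> simp [pvLoopA, h]

lemma pvLoopA_eq (cs : List Char) (i count position : Int) (h : count < position) :
    pvLoopA cs i count position
      = ((pvNpos cs)[(position - count - 1).toNat]?).elim (i + cs.length) (fun j => i + 1 + j) := by
  induction cs generalizing i count with
  | nil => simp [pvLoopA, pvNpos]
  | cons c rs ih =>
    simp only [pvLoopA, if_pos h]
    by_cases hc : c = '-'
    · subst hc
      simp only [pvNpos, if_neg (fun hq => hq rfl : ¬('-' ≠ '-'))]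
      rw [ih (i + 1) count h]
      simp only [List.getElem?_map]
      cases hg : (pvNpos rs)[(position - count - 1).toNat]? <;>
        simp [Option.elim] <;> ring
    · simp only [pvNpos, if_pos (by exact hc : c ≠ '-')]
      by_cases h2 : count + 1 < position
      · rw [ih (i + 1) (count + 1) h2]
        have hk : (position - count - 1).toNat = (position - (count + 1) - 1).toNat + 1 := by omega
        rw [hk]
        simp only [List.getElem?_cons_succ, List.getElem?_map]
        cases hg : (pvNpos rs)[(position - (count + 1) - 1).toNat]? <;>
          simp [Option.elim] <;> ring
      · rw [pvLoopA_stop rs (i + 1) (count + 1) position h2]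
        have hk : (position - count - 1).toNat = 0 := by omega
        rw [hk]
        simp [Option.elim]

-- ===== VERDICT (by name: the statement is the Claim_ definition above) =====
theorem get_alignment_position_py_spec : Claim_equal_get_alignment_position_py := by
  intro sequence position _ _
  unfold Spec_get_alignment_position_py get_alignment_position_py get_alignment_position_py_alt
  dsimp only
  set cs := ((sequence.lookup "aligned").getD "").toList with hcs
  rw [pvEnumerate_filterMap cs 0]
  have hmap : (pvNpos cs).map (· + 0) = pvNpos cs := by simp
  rw [hmap]
  by_cases hp : 0 ≤ position
  · rw [pvLoopA_eq cs (-1) (-1) position (by omega)]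
    have hk : (position - (-1) - 1).toNat = position.toNat := by omega
    rw [hk]
    by_cases hlen : position < ((pvNpos cs).length : Int)
    · have hlt : position.toNat < (pvNpos cs).length := by omega
      rw [List.getElem?_eq_getElem hlt]
      rw [if_pos ⟨hp, hlen⟩]
      rw [PySem.List.pyGetD_eq_getElem _ 0 hp hlen]
      simp [Option.elim]
    · have : (pvNpos cs)[position.toNat]? = none := by
        rw [List.getElem?_eq_none_iff]; omega
      rw [this, if_neg (by omega), if_neg (by omega)]
      simp [Option.elim]; ring
  · rw [pvLoopA_stop cs (-1) (-1) position (by omega)]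
    rw [if_neg (by omega), if_pos (by omega)]
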